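-- pv_equiv track=rewrite | github.com/Insta-Bids-System/instabids-v2 | ai-agents/agents/cda/tier1_matcher_v2.py | _check_specialty_match
-- ===== SOURCE A (Python) =====
-- def _check_specialty_match(project_type: str, specialties: list[str]) -> bool:
--     """Check if contractor specialties match project type"""
--     if not project_type or not specialties:
--         return True  # If we don't know, include them
--
--     # Project type keywords
--     project_keywords = project_type.lower().split()
--
--     # Check each specialty
--     for specialty in specialties:
--         specialty_lower = specialty.lower()
--         # Check for any keyword match
--         for keyword in project_keywords:
--             if keyword in specialty_lower:
--                 return True
--
--     # Common mappings
--     mappings = {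
--         "kitchen": ["kitchen", "remodel", "cabinet", "countertop"],
--         "bathroom": ["bathroom", "bath", "plumbing", "tile"],
--         "deck": ["deck", "patio", "outdoor", "carpentry"],
--         "roofing": ["roof", "roofing", "shingle", "gutter"],
--         "painting": ["paint", "painting", "drywall", "interior"],
--         "flooring": ["floor", "flooring", "tile", "hardwood", "carpet"],
--         "plumbing": ["plumb", "plumbing", "pipe", "drain"],
--         "electrical": ["electric", "electrical", "wiring", "panel"]
--     }
--
--     # Check mappings
--     for key, values in mappings.items():
--         if key in project_type:
--             for specialty in specialties:
--                 if any(v in specialty.lower() for v in values):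
--                     return True
--
--     return False
-- ===== SOURCE B (Python) =====
-- MAPPINGS = {
--     "kitchen": ["kitchen", "remodel", "cabinet", "countertop"],
--     "bathroom": ["bathroom", "bath", "plumbing", "tile"],
--     "deck": ["deck", "patio", "outdoor", "carpentry"],
--     "roofing": ["roof", "roofing", "shingle", "gutter"],
--     "painting": ["paint", "painting", "drywall", "interior"],
--     "flooring": ["floor", "flooring", "tile", "hardwood", "carpet"],
--     "plumbing": ["plumb", "plumbing", "pipe", "drain"],
--     "electrical": ["electric", "electrical", "wiring", "panel"]
-- }
--
--
-- def _check_specialty_match(project_type: str, specialties: list[str]) -> bool: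
--     """Check if contractor specialties match project type"""
--     if not project_type or not specialties:
--         return True  # If we don't know, include them
--
--     # Fuse all lowered specialties into ONE haystack, newline-separated.
--     # Every substring we ever search for (a whitespace-split word of the
--     # project type, or a mapping value) contains no newline and no other
--     # whitespace, so it occurs in the haystack iff it occurs in some
--     # single specialty: the per-specialty loop disappears entirely.
--     haystack = "\n".join(s.lower() for s in specialties)
--
--     candidates = project_type.lower().split() + [
--         v
--         for key, values in MAPPINGS.items()
--         if key in project_type
--         for v in values
--     ]
--     return any(c in haystack for c in candidates)
-- ===== Notes on version B (the rewrite author's own statement) =====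
-- stated objective: alternative
-- what changed: B fuses all lowered specialties into one newline-joined haystack string and tests each candidate substring once against it, eliminating the per-specialty scanning loops of A's two phases (correct because no searched substring contains whitespace, so it crosses no join boundary).
import Mathlib
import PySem

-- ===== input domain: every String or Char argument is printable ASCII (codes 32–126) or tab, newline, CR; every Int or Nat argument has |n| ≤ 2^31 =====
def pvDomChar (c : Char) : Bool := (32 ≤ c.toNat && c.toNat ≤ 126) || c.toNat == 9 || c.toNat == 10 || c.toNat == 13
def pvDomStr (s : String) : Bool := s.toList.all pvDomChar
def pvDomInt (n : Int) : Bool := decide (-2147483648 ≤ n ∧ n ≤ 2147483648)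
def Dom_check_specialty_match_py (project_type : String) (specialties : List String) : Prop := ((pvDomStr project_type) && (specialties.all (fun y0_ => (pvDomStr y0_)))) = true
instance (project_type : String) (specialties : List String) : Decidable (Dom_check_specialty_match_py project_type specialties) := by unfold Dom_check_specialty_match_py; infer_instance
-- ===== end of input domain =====

-- B joins all lowered specialties into one newline-separated haystack and tests each candidate substring once against it, removing A's per-specialty scanning loops; objective: alternative.


-- ===== PORT A =====
-- shared data: the literal `mappings` dict of the Python source (pure data, used by both ports)
def pvMappings : List (String × List String) :=
  [("kitchen", ["kitchen", "remodel", "cabinet", "countertop"]),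
   ("bathroom", ["bathroom", "bath", "plumbing", "tile"]),
   ("deck", ["deck", "patio", "outdoor", "carpentry"]),
   ("roofing", ["roof", "roofing", "shingle", "gutter"]),
   ("painting", ["paint", "painting", "drywall", "interior"]),
   ("flooring", ["floor", "flooring", "tile", "hardwood", "carpet"]),
   ("plumbing", ["plumb", "plumbing", "pipe", "drain"]),
   ("electrical", ["electric", "electrical", "wiring", "panel"])]

-- A, phase 1: for specialty in specialties: for keyword in project_keywords: if keyword in specialty_lower: return True
def pvPhase1 (project_keywords : List String) (specialties : List String) : Bool :=
  specialties.any (fun specialty =>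
    project_keywords.any (fun keyword => PySem.Str.isIn keyword (PySem.Str.lower specialty)))

-- A, phase 2: for key, values in mappings.items(): if key in project_type: for specialty: if any(v in specialty.lower() ...): return True
def pvPhase2 (project_type : String) (specialties : List String) : Bool :=
  pvMappings.any (fun kv =>
    PySem.Str.isIn kv.1 project_type &&
      specialties.any (fun specialty =>
        kv.2.any (fun v => PySem.Str.isIn v (PySem.Str.lower specialty))))

def check_specialty_match_py (project_type : String) (specialties : List String) : Bool :=
  if project_type == "" || specialties.isEmpty then true
  else
    let project_keywords := PySem.Str.split₀ (PySem.Str.lower project_type)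
    if pvPhase1 project_keywords specialties then true
    else pvPhase2 project_type specialties

-- ===== PORT B =====
def check_specialty_match_py_alt (project_type : String) (specialties : List String) : Bool :=
  if project_type == "" || specialties.isEmpty then true
  else
    -- one haystack: all lowered specialties, newline-joined
    let haystack := PySem.Str.join "\n" (specialties.map PySem.Str.lower)
    let candidates :=
      PySem.Str.split₀ (PySem.Str.lower project_type) ++
        (pvMappings.filter (fun kv => PySem.Str.isIn kv.1 project_type)).flatMap (fun kv => kv.2)
    candidates.any (fun c => PySem.Str.isIn c haystack)

-- ===== PRECONDITION & SPEC =====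
def Spec_check_specialty_match_py (project_type : String) (specialties : List String) (out : Bool) : Prop := out = check_specialty_match_py_alt project_type specialties
instance (project_type : String) (specialties : List String) (out : Bool) : Decidable (Spec_check_specialty_match_py project_type specialties out) := by unfold Spec_check_specialty_match_py; infer_instance

-- ===== CLAIM (what is proved, stated in full; the proofs are below) =====
def Claim_equal_check_specialty_match_py : Prop := ∀ (project_type : String) (specialties : List String), Dom_check_specialty_match_py project_type specialties → Spec_check_specialty_match_py project_type specialties (check_specialty_match_py project_type specialties)

-- ===== LEMMAS AND PROOFS =====

-- an early-return first phase followed by a second scan equals one scan for either condition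
lemma ite_any_or {α : Type} (xs : List α) (a b : α → Bool) :
    (if xs.any a then true else xs.any b) = xs.any (fun x => a x || b x) := by
  cases hc : xs.any a with
  | true =>
    rw [if_pos rfl]
    rw [List.any_eq_true] at hc
    obtain ⟨x, hx, ha⟩ := hc
    exact (List.any_eq_true.mpr ⟨x, hx, by simp [ha]⟩).symm
  | false =>
    rw [if_neg (by simp), Bool.eq_iff_iff, List.any_eq_true, List.any_eq_true]
    rw [List.any_eq_false] at hc
    constructor
    · rintro ⟨x, hx, hb⟩; exact ⟨x, hx, by simp [hb]⟩
    · rintro ⟨x, hx, h⟩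
      rcases Bool.or_eq_true_iff.mp h with h | h
      · exact absurd h (by simp [hc x hx])
      · exact ⟨x, hx, h⟩

-- A's second phase equals a pass over the gathered mapping values (quantifier swap).
lemma phase2_eq_gather (project_type : String) (specialties : List String) :
    pvPhase2 project_type specialties =
      specialties.any (fun s =>
        ((pvMappings.filter (fun kv => PySem.Str.isIn kv.1 project_type)).flatMap (fun kv => kv.2)).any
          (fun sub => PySem.Str.isIn sub (PySem.Str.lower s))) := by
  rw [Bool.eq_iff_iff]
  simp only [pvPhase2, List.any_eq_true, List.mem_flatMap, List.mem_filter,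
    Bool.and_eq_true]
  constructor
  · rintro ⟨kv, hkv, hin, s, hs, v, hv, h⟩
    exact ⟨s, hs, v, ⟨kv, ⟨hkv, hin⟩, hv⟩, h⟩
  · rintro ⟨s, hs, v, ⟨kv, ⟨hkv, hin⟩, hv⟩, h⟩
    exact ⟨kv, hkv, hin, s, hs, v, hv, h⟩

-- an infix that avoids the separator character lies wholly on one side of it
lemma infix_append_cons {sub a b : List Char} {c : Char} (hc : c ∉ sub) :
    sub <:+: (a ++ c :: b) ↔ sub <:+: a ∨ sub <:+: b := by
  constructor
  · rintro ⟨s, t, h⟩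
    have h' : s ++ (sub ++ t) = a ++ (c :: b) := by simpa [List.append_assoc] using h
    rcases List.append_eq_append_iff.mp h' with ⟨a', ha, h2⟩ | ⟨s', hs, h2⟩
    · -- a = s ++ a', sub ++ t = a' ++ c :: b
      rcases List.append_eq_append_iff.mp h2 with ⟨a'', ha', _⟩ | ⟨c', hsub, hct⟩
      · -- a' = sub ++ a'' : sub is infix of a
        exact Or.inl ⟨s, a'', by simp [ha, ha']⟩
      · -- sub = a' ++ c', c :: b = c' ++ t
        cases c' with
        | nil => exact Or.inl ⟨s, [], by simp [ha, hsub]⟩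
        | cons d d' =>
          exfalso
          have hd : c = d ∧ b = d' ++ t := by simpa using hct
          apply hc
          rw [hsub, ← hd.1]
          exact List.mem_append_right _ List.mem_cons_self
    · -- s = a ++ s', c :: b = s' ++ (sub ++ t)
      cases s' with
      | nil =>
        cases sub with
        | nil => exact Or.inl List.nil_infix
        | cons d d' =>
          exfalso
          have hd : c = d ∧ b = d' ++ t := by simpa using h2
          apply hc
          rw [hd.1]
          exact List.mem_cons_self
      | cons e e' =>
        have hd : c = e ∧ b = e' ++ (sub ++ t) := by simpa using h2
        exact Or.inr ⟨e', t, by simp [hd.2]⟩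
  · rintro (⟨s, t, h⟩ | ⟨s, t, h⟩)
    · exact ⟨s, t ++ c :: b, by rw [← h]; simp⟩
    · exact ⟨a ++ c :: s, t, by rw [← h]; simp⟩

-- membership of a separator-free substring in an intercalation = in some part
lemma isIn_intercalate (sub : List Char) (c : Char) (hc : c ∉ sub) :
    ∀ (xs : List (List Char)), xs ≠ [] →
      (PySem.Chars.isIn sub (List.intercalate [c] xs) = xs.any (fun x => PySem.Chars.isIn sub x))
  | [], h => absurd rfl h
  | [x], _ => by
      simp [List.intercalate]
  | x :: y :: rest, _ => by
      have ih := isIn_intercalate sub c hc (y :: rest) (by simp)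
      have hstep : List.intercalate [c] (x :: y :: rest) =
          x ++ c :: List.intercalate [c] (y :: rest) := by
        simp [List.intercalate]
      rw [hstep, Bool.eq_iff_iff, PySem.Chars.isIn_iff_infix, infix_append_cons hc]
      rw [Bool.eq_iff_iff, PySem.Chars.isIn_iff_infix] at ih
      simp only [List.any_cons, Bool.or_eq_true, ← PySem.Chars.isIn_iff_infix, ih]

-- every word produced by split₀ is whitespace-free (loop invariant of split₀.go)
lemma go_nospace : ∀ (s cur : List Char) (acc : List (List Char)),
    (∀ ch ∈ cur, PySem.Chars.isspace ch = false) →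
    (∀ w ∈ acc, ∀ ch ∈ w, PySem.Chars.isspace ch = false) →
    ∀ w ∈ PySem.Chars.split₀.go s cur acc, ∀ ch ∈ w, PySem.Chars.isspace ch = false
  | [], cur, acc, hcur, hacc => by
      unfold PySem.Chars.split₀.go
      split
      · intro w hw
        exact hacc w (by simpa using hw)
      · intro w hw
        rcases List.mem_reverse.mp hw with h
        rcases List.mem_cons.mp h with h | h
        · subst h; intro ch hch; exact hcur ch (List.mem_reverse.mp hch)
        · exact hacc w h
  | c :: rest, cur, acc, hcur, hacc => by
      unfold PySem.Chars.split₀.go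
      split
      · split
        · exact go_nospace rest [] acc (by simp) hacc
        · refine go_nospace rest [] (cur.reverse :: acc) (by simp) ?_
          intro w hw
          rcases List.mem_cons.mp hw with h | h
          · subst h; intro ch hch; exact hcur ch (List.mem_reverse.mp hch)
          · exact hacc w h
      · rename_i hsp
        refine go_nospace rest (c :: cur) acc ?_ hacc
        intro ch hch
        rcases List.mem_cons.mp hch with h | h
        · subst h; simpa using hsp
        · exact hcur ch h

lemma split₀_nospace (s : List Char) :
    ∀ w ∈ PySem.Chars.split₀ s, ∀ ch ∈ w, PySem.Chars.isspace ch = false := by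
  unfold PySem.Chars.split₀
  exact go_nospace s [] [] (by simp) (by simp)

-- no candidate substring contains the separator newline
lemma candidates_no_newline (project_type : String) :
    ∀ c ∈ PySem.Str.split₀ (PySem.Str.lower project_type) ++
        (pvMappings.filter (fun kv => PySem.Str.isIn kv.1 project_type)).flatMap (fun kv => kv.2),
      '\n' ∉ c.toList := by
  intro c hc
  rcases List.mem_append.mp hc with h | h
  · intro hmem
    have hin : c.toList ∈ List.map String.toList (PySem.Str.split₀ (PySem.Str.lower project_type)) :=
      List.mem_map.mpr ⟨c, h, rfl⟩
    rw [PySem.Str.split₀_map_toList] at hin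
    have := split₀_nospace _ _ hin '\n' hmem
    simp [PySem.Chars.isspace] at this
  · rcases List.mem_flatMap.mp h with ⟨kv, hkv, hv⟩
    have hkv' : kv ∈ pvMappings := (List.mem_filter.mp hkv).1
    revert hv
    have : ∀ kv ∈ pvMappings, ∀ v ∈ kv.2, '\n' ∉ v.toList := by decide
    exact this kv hkv' c

-- a separator-free substring is in the joined haystack iff in some lowered specialty
lemma isIn_haystack (c : String) (hc : '\n' ∉ c.toList) (specialties : List String)
    (hne : specialties ≠ []) :
    PySem.Str.isIn c (PySem.Str.join "\n" (specialties.map PySem.Str.lower)) =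
      specialties.any (fun s => PySem.Str.isIn c (PySem.Str.lower s)) := by
  show PySem.Chars.isIn c.toList _ = _
  rw [PySem.Str.toList_join]
  have hjoin : PySem.Chars.join "\n".toList (List.map String.toList (specialties.map PySem.Str.lower))
      = List.intercalate ['\n'] (specialties.map (fun s => (PySem.Str.lower s).toList)) := by
    simp [PySem.Chars.join, List.map_map, Function.comp_def, PySem.Str.toList_lower]
  rw [hjoin, isIn_intercalate c.toList '\n' hc _ (by simpa using hne)]
  rw [List.any_map]
  rfl

-- swap the two `any` quantifiers
lemma any_swap {α β : Type} (xs : List α) (ys : List β) (f : α → β → Bool) :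
    xs.any (fun x => ys.any (fun y => f x y)) = ys.any (fun y => xs.any (fun x => f x y)) := by
  rw [Bool.eq_iff_iff]
  simp only [List.any_eq_true]
  tauto

-- rewrite `any` under a membership-restricted congruence
lemma any_congr_mem {α : Type} (xs : List α) (f g : α → Bool)
    (h : ∀ x ∈ xs, f x = g x) : xs.any f = xs.any g := by
  induction xs with
  | nil => rfl
  | cons x xs ih =>
    simp only [List.any_cons, h x List.mem_cons_self,
      ih (fun y hy => h y (List.mem_cons_of_mem _ hy))]

-- candidate-list pass over the joined haystack = per-specialty pass
lemma bridge (specialties : List String) (hne : specialties ≠ [])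
    (cands : List String) (hnl : ∀ c ∈ cands, '\n' ∉ c.toList) :
    cands.any (fun c => PySem.Str.isIn c (PySem.Str.join "\n" (specialties.map PySem.Str.lower)))
      = specialties.any (fun s => cands.any (fun sub => PySem.Str.isIn sub (PySem.Str.lower s))) := by
  rw [any_congr_mem _ _ _ (fun c hc => isIn_haystack c (hnl c hc) specialties hne), any_swap]

-- ===== VERDICT (by name: the statement is the Claim_ definition above) =====
theorem check_specialty_match_py_spec : Claim_equal_check_specialty_match_py := by
  intro project_type specialties _
  unfold Spec_check_specialty_match_py check_specialty_match_py check_specialty_match_py_alt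
  split
  · rfl
  · rename_i hguard
    have hne : specialties ≠ [] := fun h => hguard (by simp [h])
    rw [phase2_eq_gather,
      bridge specialties hne _ (candidates_no_newline project_type)]
    simp only [pvPhase1, List.any_append]
    exact ite_any_or _ _ _
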